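-- pv_equiv track=rewrite | github.com/nikgisST/Algorithms_with_Python_July_2023 | 7E - Introduction to Graphs/3.salaries.py | dfs
-- ===== SOURCE A (Python) =====
-- def dfs(employee, graph, salaries):       # employee === node
--     if salaries[employee] is not None:
--         return salaries[employee]
--
--     if len(graph[employee]) == 0:
--         salaries[employee] = 1
--         return 1
--
--     salary = 0
--     for child in graph[employee]:
--         salary += dfs(child, graph, salaries)
--
--     salaries[employee] = salary
--     return salary
-- ===== SOURCE B (Python) =====
-- def dfs(employee, graph, salaries):
--     # Iterative worklist accumulation: no recursion, no memo table; equivalence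
--     # is about the return value only (A mutates `salaries` in place, B does not).
--     total = 0
--     stack = [employee]
--     while stack:
--         node = stack.pop()
--         value = salaries[node]
--         if value is not None:
--             total += value
--         elif not graph[node]:
--             total += 1
--         else:
--             stack.extend(graph[node])
--     return total
-- ===== Notes on version B (the rewrite author's own statement) =====
-- stated objective: alternative
-- what changed: B replaces A's memoized recursive DFS (which writes computed salaries back into the dict) by an iterative worklist loop with an explicit stack and a running total and no memo table; per-reference sums of memoized values coincide, so the returned value is the same. Equivalence is about the return value only: A mutates its salaries argument, B does not.
import Mathlib
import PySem

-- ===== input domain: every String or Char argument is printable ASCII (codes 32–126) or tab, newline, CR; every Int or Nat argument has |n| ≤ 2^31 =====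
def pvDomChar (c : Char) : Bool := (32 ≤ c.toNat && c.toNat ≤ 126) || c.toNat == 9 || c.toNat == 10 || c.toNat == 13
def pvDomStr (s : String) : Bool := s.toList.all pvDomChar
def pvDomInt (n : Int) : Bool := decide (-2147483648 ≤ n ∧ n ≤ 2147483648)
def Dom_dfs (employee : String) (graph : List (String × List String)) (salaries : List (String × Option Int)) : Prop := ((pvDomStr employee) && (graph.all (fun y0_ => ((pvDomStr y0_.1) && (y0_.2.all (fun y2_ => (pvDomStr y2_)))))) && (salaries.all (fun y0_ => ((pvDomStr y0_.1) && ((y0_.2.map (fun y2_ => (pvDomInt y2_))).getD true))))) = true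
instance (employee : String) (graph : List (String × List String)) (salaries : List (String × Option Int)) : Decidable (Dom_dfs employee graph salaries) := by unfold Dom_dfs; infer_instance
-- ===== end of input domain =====

-- B replaces A's memoized recursive DFS (which writes computed values back into `salaries`)
-- by an iterative worklist loop: explicit stack, running total, no memo table — the per-
-- reference sums of memoized values coincide, so the return value is the same; equivalence
-- is about the RETURN value only (A mutates its `salaries` argument, B does not).

-- ===== PORT A =====
-- A's recursion is ported with a fuel parameter (salaries.length + 1, enough for any
-- acyclic run admitted by Pre_); on exhaustion / KeyError the port returns none.
def pvStepA (F : String → PySem.Dict String (Option Int) → Option (Int × PySem.Dict String (Option Int)))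
    (acc : Option (Int × PySem.Dict String (Option Int))) (c : String) :
    Option (Int × PySem.Dict String (Option Int)) :=
  acc.bind (fun sd => (F c sd.2).map (fun vd => (sd.1 + vd.1, vd.2)))

def dfsAux (graph : List (String × List String)) :
    Nat → String → PySem.Dict String (Option Int) → Option (Int × PySem.Dict String (Option Int))
  | 0, _, _ => none
  | f + 1, n, d =>
    match d.get? n with
    | none => none                             -- KeyError: salaries[n]
    | some (some v) => some (v, d)             -- early return on a memoized entry
    | some none =>
      match (PySem.Dict.mk graph).get? n with
      | none => none                           -- KeyError: graph[n]
      | some cs =>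
        if cs = [] then some (1, d.insert n (some 1))
        else
          match cs.foldl (pvStepA (fun c d' => dfsAux graph f c d')) (some ((0 : Int), d)) with
          | none => none
          | some (s, d') => some (s, d'.insert n (some s))

def dfs (employee : String) (graph : List (String × List String)) (salaries : List (String × Option Int)) : Int :=
  ((dfsAux graph (salaries.length + 1) employee (PySem.Dict.mk salaries)).map Prod.fst).getD 0

-- ===== PORT B =====
-- B's while-loop, fueled: the fuel only bounds the number of loop iterations (the loop
-- stops by itself when the stack empties; the bound is proved sufficient below).
-- Python's stack top (list end, `pop`) is the Lean list head; `extend(graph[node])`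
-- therefore pushes `cs.reverse` at the head.
def dfsLoop (g : PySem.Dict String (List String)) (d : PySem.Dict String (Option Int)) :
    Nat → List String → Int → Option Int
  | _, [], total => some total
  | 0, _ :: _, _ => none
  | f + 1, node :: rest, total =>
    match d.get? node with
    | none => none                             -- KeyError: salaries[node]
    | some (some v) => dfsLoop g d f rest (total + v)
    | some none =>
      match g.get? node with
      | none => none                           -- KeyError: graph[node]
      | some cs =>
        if cs = [] then dfsLoop g d f rest (total + 1)
        else dfsLoop g d f (cs.reverse ++ rest) total

def dfs_alt (employee : String) (graph : List (String × List String)) (salaries : List (String × Option Int)) : Int :=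
  (dfsLoop (PySem.Dict.mk graph) (PySem.Dict.mk salaries)
      (((graph.map (fun p => p.2.length)).sum + 2) ^ (salaries.length + 2))
      [employee] 0).getD 0

-- ===== PRECONDITION & SPEC =====
def pvChildren (graph : List (String × List String)) (n : String) : List String :=
  ((PySem.Dict.mk graph).get? n).getD []

-- bounded reachability from a to b stepping only through not-yet-memoized nodes
def pvReach (graph : List (String × List String)) (salaries : List (String × Option Int)) :
    Nat → String → String → Bool
  | 0, a, b => a == b
  | f + 1, a, b =>
    a == b || (((PySem.Dict.mk salaries).get? a == some none) &&
               (pvChildren graph a).any (fun c => pvReach graph salaries f c b))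

-- Pre_ excludes exactly the inputs on which A raises: a KeyError (some node reachable from
-- employee — stopping at already-memoized entries — is missing from salaries or graph) or
-- unbounded recursion (such a node lies on a cycle).
def Pre_dfs (employee : String) (graph : List (String × List String)) (salaries : List (String × Option Int)) : Prop :=
  ∀ b ∈ employee :: graph.flatMap (fun p => p.2),
    pvReach graph salaries (salaries.length + 1) employee b = true →
      ((PySem.Dict.mk salaries).get? b).isSome = true ∧
      ((PySem.Dict.mk salaries).get? b = some none →
        ((PySem.Dict.mk graph).get? b).isSome = true ∧
        ∀ c ∈ pvChildren graph b, pvReach graph salaries (salaries.length + 1) c b = false)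
instance (employee : String) (graph : List (String × List String)) (salaries : List (String × Option Int)) : Decidable (Pre_dfs employee graph salaries) := by unfold Pre_dfs; infer_instance

def pvWitness_dfs : String × (List (String × List String)) × (List (String × Option Int)) :=
  ("a", [("a", ["b", "b", "c"]), ("b", ["c"]), ("c", [])], [("a", none), ("b", none), ("c", some 4)])

def Spec_dfs (employee : String) (graph : List (String × List String)) (salaries : List (String × Option Int)) (out : Int) : Prop := out = dfs_alt employee graph salaries
instance (employee : String) (graph : List (String × List String)) (salaries : List (String × Option Int)) (out : Int) : Decidable (Spec_dfs employee graph salaries out) := by unfold Spec_dfs; infer_instance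

-- ===== CLAIM (what is proved, stated in full; the proofs are below) =====
def Claim_equal_dfs : Prop := ∀ (employee : String) (graph : List (String × List String)) (salaries : List (String × Option Int)), Dom_dfs employee graph salaries → Pre_dfs employee graph salaries → Spec_dfs employee graph salaries (dfs employee graph salaries)

-- ===== LEMMAS AND PROOFS =====

theorem pvReach_refl (g : List (String × List String)) (s : List (String × Option Int))
    (f : Nat) (a : String) : pvReach g s f a a = true := by
  cases f <;> simp [pvReach]

theorem pvReach_step (g : List (String × List String)) (s : List (String × Option Int))
    {f : Nat} {a b c : String} (hexp : (PySem.Dict.mk s).get? a = some none)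
    (hc : c ∈ pvChildren g a) (hr : pvReach g s f c b = true) :
    pvReach g s (f + 1) a b = true := by
  simp only [pvReach, Bool.or_eq_true, beq_iff_eq, Bool.and_eq_true, List.any_eq_true]
  exact Or.inr ⟨by simp [hexp], c, hc, hr⟩

theorem pvReach_mono (g : List (String × List String)) (s : List (String × Option Int))
    {f f' : Nat} (hle : f ≤ f') {a b : String} (h : pvReach g s f a b = true) :
    pvReach g s f' a b = true := by
  induction f generalizing f' a b with
  | zero =>
    simp only [pvReach, beq_iff_eq] at h
    subst h; exact pvReach_refl g s f' a
  | succ f ih =>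
    obtain ⟨f'', rfl⟩ : ∃ f'', f' = f'' + 1 := ⟨f' - 1, by omega⟩
    simp only [pvReach, Bool.or_eq_true, beq_iff_eq, Bool.and_eq_true, List.any_eq_true] at h ⊢
    rcases h with h | ⟨hexp, c, hc, hr⟩
    · exact Or.inl h
    · exact Or.inr ⟨hexp, c, hc, ih (by omega) hr⟩

theorem pvReach_snoc (g : List (String × List String)) (s : List (String × Option Int))
    {f : Nat} {x n c : String} (h : pvReach g s f x n = true)
    (hn : (PySem.Dict.mk s).get? n = some none) (hc : c ∈ pvChildren g n) :
    pvReach g s (f + 1) x c = true := by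
  induction f generalizing x with
  | zero =>
    simp only [pvReach, beq_iff_eq] at h
    subst h
    exact pvReach_step g s hn hc (pvReach_refl g s 0 c)
  | succ f ih =>
    simp only [pvReach, Bool.or_eq_true, beq_iff_eq, Bool.and_eq_true, List.any_eq_true] at h
    rcases h with h | ⟨hexp, c₁, hc₁, hr⟩
    · subst h
      exact pvReach_step g s hn hc (pvReach_refl g s (f + 1) c)
    · exact pvReach_step g s (by simpa using hexp) hc₁ (ih hr)

theorem pvReach_mem (g : List (String × List String)) (s : List (String × Option Int))
    {f : Nat} {a b : String} (h : pvReach g s f a b = true) :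
    b = a ∨ b ∈ g.flatMap (fun p => p.2) := by
  induction f generalizing a with
  | zero =>
    simp only [pvReach, beq_iff_eq] at h
    exact Or.inl h.symm
  | succ f ih =>
    simp only [pvReach, Bool.or_eq_true, beq_iff_eq, Bool.and_eq_true, List.any_eq_true] at h
    rcases h with h | ⟨_, c, hc, hr⟩
    · exact Or.inl h.symm
    · refine Or.inr ?_
      have hb : b = c ∨ b ∈ g.flatMap (fun p => p.2) := ih hr
      unfold pvChildren at hc
      cases hg : (PySem.Dict.mk g).get? a with
      | none => rw [hg] at hc; simp at hc
      | some cs =>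
        rw [hg] at hc; simp only [Option.getD_some] at hc
        rcases hb with rfl | hb
        · exact List.mem_flatMap.mpr ⟨(a, cs), PySem.Dict.mem_items_of_get?_eq_some (PySem.Dict.mk g) hg, hc⟩
        · exact hb

theorem pvNodup_len (s : List (String × Option Int)) {p : List String} (hnd : p.Nodup)
    (hmem : ∀ x ∈ p, ((PySem.Dict.mk s).get? x).isSome = true) : p.length ≤ s.length := by
  have hsub : p ⊆ (PySem.Dict.mk s).keys := by
    intro x hx
    rw [← PySem.Dict.contains_iff_mem_keys, PySem.Dict.contains_eq_isSome_get?]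
    exact hmem x hx
  have := (hnd.subperm hsub).length_le
  rwa [PySem.Dict.keys_mk, List.length_map] at this

theorem pvPreAt (employee : String) (g : List (String × List String)) (s : List (String × Option Int))
    (hPre : Pre_dfs employee g s) (p : List String) (n : String)
    (hexp : ∀ x ∈ p, (PySem.Dict.mk s).get? x = some none)
    (hnd : (p ++ [n]).Nodup)
    (hFwd : ∀ x ∈ p ++ [n], pvReach g s p.length employee x = true) :
    p.length ≤ s.length ∧
    (((PySem.Dict.mk s).get? n).isSome = true ∧
      ((PySem.Dict.mk s).get? n = some none →
        ((PySem.Dict.mk g).get? n).isSome = true ∧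
        ∀ c ∈ pvChildren g n, pvReach g s (s.length + 1) c n = false)) := by
  have hpnd : p.Nodup := (List.nodup_append.mp hnd).1
  have hlen : p.length ≤ s.length :=
    pvNodup_len s hpnd (fun x hx => by rw [hexp x hx]; rfl)
  have hr : pvReach g s (s.length + 1) employee n = true :=
    pvReach_mono g s (by omega) (hFwd n (by simp))
  have hmem : n ∈ employee :: g.flatMap (fun q => q.2) := by
    rcases pvReach_mem g s hr with h | h
    · simp [h]
    · exact List.mem_cons_of_mem _ h
  exact ⟨hlen, hPre n hmem hr⟩

theorem pvNotMemPath (employee : String) (g : List (String × List String)) (s : List (String × Option Int))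
    (hPre : Pre_dfs employee g s) (p : List String) (n c : String) (cs : List String)
    (hS : (PySem.Dict.mk s).get? n = some none)
    (hG : (PySem.Dict.mk g).get? n = some cs)
    (hc : c ∈ cs)
    (hexp : ∀ x ∈ p, (PySem.Dict.mk s).get? x = some none)
    (hnd : (p ++ [n]).Nodup)
    (hFwd : ∀ x ∈ p ++ [n], pvReach g s p.length employee x = true)
    (hBack : ∀ x ∈ p ++ [n], pvReach g s p.length x n = true) :
    c ∉ p ++ [n] := by
  have hcChild : c ∈ pvChildren g n := by unfold pvChildren; rw [hG]; simpa using hc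
  have hlen : p.length ≤ s.length := (pvPreAt employee g s hPre p n hexp hnd hFwd).1
  intro hcm
  have hrc : pvReach g s p.length c n = true := hBack c hcm
  by_cases hcn : c = n
  · have hcyc := ((pvPreAt employee g s hPre p n hexp hnd hFwd).2.2 hS).2 c hcChild
    rw [hcn] at hcyc
    rw [pvReach_refl g s (s.length + 1) n] at hcyc
    simp at hcyc
  · cases hp : p.length with
    | zero =>
      have : p = [] := List.length_eq_zero_iff.mp hp
      subst this
      simp only [List.nil_append, List.mem_singleton] at hcm
      exact hcn hcm
    | succ m =>
      rw [hp] at hrc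
      simp only [pvReach, Bool.or_eq_true, beq_iff_eq, Bool.and_eq_true, List.any_eq_true] at hrc
      rcases hrc with h | ⟨hexpc, c₁, hc₁, hr₁⟩
      · exact hcn h
      · have h1 : pvReach g s (m + 1) c₁ c = true := pvReach_snoc g s hr₁ hS hcChild
        have hBIG : pvReach g s (s.length + 1) c₁ c = true :=
          pvReach_mono g s (by omega) h1
        have hreach_c : pvReach g s (s.length + 1) employee c =
            true := pvReach_mono g s (by omega) (hFwd c hcm)
        have hmemc : c ∈ employee :: g.flatMap (fun q => q.2) := by
          rcases pvReach_mem g s hreach_c with h | h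
          · simp [h]
          · exact List.mem_cons_of_mem _ h
        have hfalse := ((hPre c hmemc hreach_c).2 hexpc).2 c₁ hc₁
        rw [hfalse] at hBIG
        simp at hBIG

theorem pvStepSet (employee : String) (g : List (String × List String)) (s : List (String × Option Int))
    (hPre : Pre_dfs employee g s) (p : List String) (n c : String) (cs : List String)
    (hS : (PySem.Dict.mk s).get? n = some none)
    (hG : (PySem.Dict.mk g).get? n = some cs)
    (hc : c ∈ cs)
    (hexp : ∀ x ∈ p, (PySem.Dict.mk s).get? x = some none)
    (hnd : (p ++ [n]).Nodup)
    (hFwd : ∀ x ∈ p ++ [n], pvReach g s p.length employee x = true)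
    (hBack : ∀ x ∈ p ++ [n], pvReach g s p.length x n = true) :
    (∀ x ∈ p ++ [n], (PySem.Dict.mk s).get? x = some none) ∧
    ((p ++ [n]) ++ [c]).Nodup ∧
    (∀ x ∈ (p ++ [n]) ++ [c], pvReach g s (p ++ [n]).length employee x = true) ∧
    (∀ x ∈ (p ++ [n]) ++ [c], pvReach g s (p ++ [n]).length x c = true) := by
  have hcChild : c ∈ pvChildren g n := by unfold pvChildren; rw [hG]; simpa using hc
  have hnotin : c ∉ p ++ [n] :=
    pvNotMemPath employee g s hPre p n c cs hS hG hc hexp hnd hFwd hBack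
  have hexp' : ∀ x ∈ p ++ [n], (PySem.Dict.mk s).get? x = some none := by
    intro x hx
    rcases List.mem_append.mp hx with hx | hx
    · exact hexp x hx
    · simp only [List.mem_singleton] at hx; rw [hx]; exact hS
  refine ⟨hexp', ?_, ?_, ?_⟩
  · rw [List.nodup_append]
    refine ⟨hnd, List.nodup_singleton c, ?_⟩
    intro x hx y hy heq
    subst heq
    have hxc : x = c := by simpa using hy
    subst hxc
    exact hnotin hx
  · intro x hx
    simp only [List.length_append, List.length_singleton]
    rcases List.mem_append.mp hx with hx | hx
    · exact pvReach_mono g s (by omega) (hFwd x hx)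
    · simp only [List.mem_singleton] at hx; subst hx
      exact pvReach_snoc g s (hFwd n (by simp)) hS hcChild
  · intro x hx
    simp only [List.length_append, List.length_singleton]
    rcases List.mem_append.mp hx with hx | hx
    · exact pvReach_snoc g s (hBack x hx) hS hcChild
    · simp only [List.mem_singleton] at hx; subst hx
      exact pvReach_refl g s _ _

-- proof-side pure recursion computing, per node, B's contribution value together with the
-- number of loop iterations B spends on that node (the size of the unrolled tree)
def pvStep2 (F : String → Option (Int × Nat)) (acc : Option (Int × Nat)) (c : String) :
    Option (Int × Nat) :=
  acc.bind (fun s => (F c).map (fun v => (s.1 + v.1, s.2 + v.2)))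

def dfsVS (graph : List (String × List String)) (d : PySem.Dict String (Option Int)) :
    Nat → String → Option (Int × Nat)
  | 0, _ => none
  | f + 1, n =>
    match d.get? n with
    | none => none
    | some (some v) => some (v, 1)
    | some none =>
      match (PySem.Dict.mk graph).get? n with
      | none => none
      | some cs =>
        if cs = [] then some (1, 1)
        else (cs.foldl (pvStep2 (fun c => dfsVS graph d f c)) (some ((0 : Int), 0))).map
          (fun p => (p.1, p.2 + 1))

theorem pvStep2_none (F : String → Option (Int × Nat)) (cs : List String) :
    cs.foldl (pvStep2 F) none = none := by
  induction cs with
  | nil => rfl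
  | cons c cs ih => simpa [pvStep2] using ih

theorem pvFold2_sum (F : String → Option (Int × Nat)) (cs : List String)
    (hsome : ∀ c ∈ cs, (F c).isSome = true) (a : Int) (b : Nat) :
    cs.foldl (pvStep2 F) (some (a, b)) =
      some (a + (cs.map (fun c => ((F c).getD (0, 0)).1)).sum,
            b + (cs.map (fun c => ((F c).getD (0, 0)).2)).sum) := by
  induction cs generalizing a b with
  | nil => simp
  | cons c cs ih =>
    obtain ⟨p, hp⟩ := Option.isSome_iff_exists.mp (hsome c (by simp))
    have h1 : pvStep2 F (some (a, b)) c = some (a + p.1, b + p.2) := by simp [pvStep2, hp]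
    rw [List.foldl_cons, h1, ih (fun x hx => hsome x (by simp [hx]))]
    simp [hp, add_assoc]

theorem pvFold2_some (F : String → Option (Int × Nat)) (cs : List String) (a : Int) (b : Nat)
    {r : Int × Nat} (h : cs.foldl (pvStep2 F) (some (a, b)) = some r) :
    ∀ c ∈ cs, (F c).isSome = true := by
  induction cs generalizing a b with
  | nil => simp
  | cons c cs ih =>
    intro x hx
    rw [List.foldl_cons] at h
    cases hf : F c with
    | none =>
      rw [show pvStep2 F (some (a, b)) c = none by simp [pvStep2, hf], pvStep2_none] at h
      exact absurd h (by simp)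
    | some p =>
      rw [show pvStep2 F (some (a, b)) c = some (a + p.1, b + p.2) by simp [pvStep2, hf]] at h
      rcases List.mem_cons.mp hx with rfl | hx
      · simp [hf]
      · exact ih _ _ h x hx

theorem dfsVS_eq (g : List (String × List String)) (d : PySem.Dict String (Option Int))
    (f : Nat) (n : String) :
    dfsVS g d (f + 1) n =
      (match d.get? n with
      | none => none
      | some (some v) => some (v, 1)
      | some none =>
        match (PySem.Dict.mk g).get? n with
        | none => none
        | some cs =>
          if cs = [] then some (1, 1)
          else (cs.foldl (pvStep2 (fun c => dfsVS g d f c)) (some ((0 : Int), 0))).map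
            (fun p => (p.1, p.2 + 1))) := rfl

theorem dfsLoop_eq (g : PySem.Dict String (List String)) (d : PySem.Dict String (Option Int))
    (f : Nat) (node : String) (rest : List String) (total : Int) :
    dfsLoop g d (f + 1) (node :: rest) total =
      (match d.get? node with
      | none => none
      | some (some v) => dfsLoop g d f rest (total + v)
      | some none =>
        match g.get? node with
        | none => none
        | some cs =>
          if cs = [] then dfsLoop g d f rest (total + 1)
          else dfsLoop g d f (cs.reverse ++ rest) total) := rfl

theorem pvVS_mono (g : List (String × List String)) (d : PySem.Dict String (Option Int))
    {f : Nat} {n : String} {p : Int × Nat} (h : dfsVS g d f n = some p) :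
    dfsVS g d (f + 1) n = some p := by
  induction f generalizing n p with
  | zero => simp [dfsVS] at h
  | succ f ih =>
    rw [dfsVS_eq] at h
    rw [dfsVS_eq]
    cases hd : d.get? n with
    | none => simp [hd] at h
    | some o =>
      cases o with
      | some v => simp only [hd] at h ⊢; exact h
      | none =>
        cases hg : (PySem.Dict.mk g).get? n with
        | none => simp [hd, hg] at h
        | some cs =>
          by_cases hcs : cs = []
          · simp only [hd, hg, if_pos hcs] at h ⊢; exact h
          · simp only [hd, hg, if_neg hcs] at h ⊢
            cases hfold : cs.foldl (pvStep2 (fun c => dfsVS g d f c)) (some ((0 : Int), 0)) with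
            | none => rw [hfold] at h; exact absurd h (by simp)
            | some q =>
              rw [hfold] at h
              have hsome := pvFold2_some _ cs 0 0 hfold
              have hs1 := pvFold2_sum (fun c => dfsVS g d f c) cs hsome 0 0
              have hs2 : cs.foldl (pvStep2 (fun c => dfsVS g d (f + 1) c)) (some ((0 : Int), 0)) =
                  some q := by
                have hsome' : ∀ c ∈ cs, (dfsVS g d (f + 1) c).isSome = true := by
                  intro c hc
                  obtain ⟨pc, hpc⟩ := Option.isSome_iff_exists.mp (hsome c hc)
                  simp [ih hpc]
                rw [pvFold2_sum _ cs hsome']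
                rw [hfold] at hs1
                have hmap : ∀ c ∈ cs,
                    ((dfsVS g d (f + 1) c).getD (0, 0)) = ((dfsVS g d f c).getD (0, 0)) := by
                  intro c hc
                  obtain ⟨pc, hpc⟩ := Option.isSome_iff_exists.mp (hsome c hc)
                  rw [hpc, ih hpc]
                rw [List.map_congr_left (fun c hc => by rw [hmap c hc]),
                    List.map_congr_left (fun c hc => congrArg Prod.snd (hmap c hc))]
                exact hs1.symm
              rw [hs2]
              exact h

theorem pvVS_pos (g : List (String × List String)) (d : PySem.Dict String (Option Int))
    {f : Nat} {n : String} {p : Int × Nat} (h : dfsVS g d f n = some p) : 1 ≤ p.2 := by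
  cases f with
  | zero => simp [dfsVS] at h
  | succ f =>
    rw [dfsVS_eq] at h
    cases hd : d.get? n with
    | none => simp [hd] at h
    | some o =>
      cases o with
      | some v => simp only [hd] at h; cases h; simp
      | none =>
        cases hg : (PySem.Dict.mk g).get? n with
        | none => simp [hd, hg] at h
        | some cs =>
          by_cases hcs : cs = []
          · simp only [hd, hg, if_pos hcs] at h; cases h; simp
          · simp only [hd, hg, if_neg hcs] at h
            cases hfold : cs.foldl (pvStep2 (fun c => dfsVS g d f c)) (some ((0 : Int), 0)) with
            | none => rw [hfold] at h; exact absurd h (by simp)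
            | some q => rw [hfold] at h; cases h; simp

-- sizes are bounded: the unrolled tree has at most (L+2)^f nodes, L = total child-list length
theorem pvVS_bound (g : List (String × List String)) (d : PySem.Dict String (Option Int))
    {f : Nat} {n : String} {p : Int × Nat} (h : dfsVS g d f n = some p) :
    p.2 ≤ ((g.map (fun q => q.2.length)).sum + 2) ^ f := by
  induction f generalizing n p with
  | zero => simp [dfsVS] at h
  | succ f ih =>
    set L := (g.map (fun q => q.2.length)).sum with hL
    have hX : 1 ≤ (L + 2) ^ f := Nat.one_le_pow _ _ (by omega)
    have hmono : (L + 2) ^ f ≤ (L + 2) ^ (f + 1) := Nat.pow_le_pow_right (by omega) (by omega)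
    rw [dfsVS_eq] at h
    cases hd : d.get? n with
    | none => simp [hd] at h
    | some o =>
      cases o with
      | some v => simp only [hd] at h; cases h; simpa using le_trans hX hmono
      | none =>
        cases hg : (PySem.Dict.mk g).get? n with
        | none => simp [hd, hg] at h
        | some cs =>
          by_cases hcs : cs = []
          · simp only [hd, hg, if_pos hcs] at h; cases h; simpa using le_trans hX hmono
          · simp only [hd, hg, if_neg hcs] at h
            cases hfold : cs.foldl (pvStep2 (fun c => dfsVS g d f c)) (some ((0 : Int), 0)) with
            | none => rw [hfold] at h; exact absurd h (by simp)
            | some q =>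
              rw [hfold] at h
              cases h
              have hsome := pvFold2_some _ cs 0 0 hfold
              have hs := pvFold2_sum (fun c => dfsVS g d f c) cs hsome 0 0
              rw [hfold] at hs
              have hq2 : q.2 = (cs.map (fun c => ((dfsVS g d f c).getD (0, 0)).2)).sum := by
                simp [Option.some_inj.mp hs]
              have heach : ∀ x ∈ cs.map (fun c => ((dfsVS g d f c).getD (0, 0)).2),
                  x ≤ (L + 2) ^ f := by
                intro x hx
                obtain ⟨c, hc, rfl⟩ := List.mem_map.mp hx
                obtain ⟨pc, hpc⟩ := Option.isSome_iff_exists.mp (hsome c hc)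
                rw [hpc]
                exact ih hpc
              have hsum : q.2 ≤ cs.length * (L + 2) ^ f := by
                rw [hq2]
                calc (cs.map (fun c => ((dfsVS g d f c).getD (0, 0)).2)).sum
                    ≤ (cs.map (fun c => ((dfsVS g d f c).getD (0, 0)).2)).length • ((L + 2) ^ f) :=
                      List.sum_le_card_nsmul _ _ heach
                  _ = cs.length * (L + 2) ^ f := by simp [smul_eq_mul]
              have hcsL : cs.length ≤ L := by
                have hmem : (n, cs) ∈ g := PySem.Dict.mem_items_of_get?_eq_some (PySem.Dict.mk g) hg
                have : cs.length ∈ g.map (fun q => q.2.length) :=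
                  List.mem_map.mpr ⟨(n, cs), hmem, rfl⟩
                exact List.single_le_sum (fun x _ => Nat.zero_le x) _ this
              calc q.2 + 1 ≤ cs.length * (L + 2) ^ f + 1 := by omega
                _ ≤ L * (L + 2) ^ f + 2 * (L + 2) ^ f := by
                    have h1 : cs.length * (L + 2) ^ f ≤ L * (L + 2) ^ f :=
                      Nat.mul_le_mul_right _ hcsL
                    omega
                _ = (L + 2) * (L + 2) ^ f := by ring
                _ = (L + 2) ^ (f + 1) := by rw [pow_succ, Nat.mul_comm]

-- the loop invariant: given enough fuel, the loop adds to the accumulator the sum of the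
-- per-node values of the stack
theorem pvLoop_sum (g : List (String × List String)) (d : PySem.Dict String (Option Int))
    (D : Nat) :
    ∀ (f : Nat) (stack : List String) (total : Int),
      (∀ n ∈ stack, (dfsVS g d D n).isSome = true) →
      (stack.map (fun n => ((dfsVS g d D n).getD (0, 0)).2)).sum ≤ f →
      dfsLoop (PySem.Dict.mk g) d f stack total =
        some (total + (stack.map (fun n => ((dfsVS g d D n).getD (0, 0)).1)).sum) := by
  intro f
  induction f using Nat.strong_induction_on with
  | _ f ih =>
    intro stack total hsome hfuel
    cases stack with
    | nil => simp [dfsLoop]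
    | cons n rest =>
      obtain ⟨p, hp⟩ := Option.isSome_iff_exists.mp (hsome n (by simp))
      have hpos : 1 ≤ p.2 := pvVS_pos g d hp
      have hhead2 : ((dfsVS g d D n).getD (0, 0)).2 = p.2 := by simp [hp]
      have hhead1 : ((dfsVS g d D n).getD (0, 0)).1 = p.1 := by simp [hp]
      obtain ⟨f', rfl⟩ : ∃ f', f = f' + 1 := by
        refine ⟨f - 1, ?_⟩
        simp only [List.map_cons, List.sum_cons, hhead2] at hfuel
        omega
      obtain ⟨D', rfl⟩ : ∃ D', D = D' + 1 := by
        cases D with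
        | zero => simp [dfsVS] at hp
        | succ D' => exact ⟨D', rfl⟩
      rw [dfsVS_eq] at hp
      rw [dfsLoop_eq]
      cases hd : d.get? n with
      | none => simp [hd] at hp
      | some o =>
        cases o with
        | some v =>
          simp only [hd] at hp ⊢
          cases hp
          rw [ih f' (by omega) rest (total + v) (fun x hx => hsome x (by simp [hx]))
            (by simp only [List.map_cons, List.sum_cons, hhead2] at hfuel; omega)]
          simp only [List.map_cons, List.sum_cons, hhead1]
          congr 1
          ring
        | none =>
          cases hg : (PySem.Dict.mk g).get? n with
          | none => simp [hd, hg] at hp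
          | some cs =>
            by_cases hcs : cs = []
            · simp only [hd, hg, if_pos hcs] at hp ⊢
              cases hp
              rw [ih f' (by omega) rest (total + 1) (fun x hx => hsome x (by simp [hx]))
                (by simp only [List.map_cons, List.sum_cons, hhead2] at hfuel; omega)]
              simp only [List.map_cons, List.sum_cons, hhead1]
              congr 1
              ring
            · simp only [hd, hg, if_neg hcs] at hp ⊢
              cases hfold : cs.foldl (pvStep2 (fun c => dfsVS g d D' c)) (some ((0 : Int), 0)) with
              | none => rw [hfold] at hp; exact absurd hp (by simp)
              | some q =>
                rw [hfold] at hp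
                have hpq : p = (q.1, q.2 + 1) := by
                  have := hp.symm
                  simpa using this
                have hsomeC := pvFold2_some _ cs 0 0 hfold
                have hmapEq : ∀ c ∈ cs,
                    (dfsVS g d (D' + 1) c).getD (0, 0) = (dfsVS g d D' c).getD (0, 0) := by
                  intro c hc
                  obtain ⟨pc, hpc⟩ := Option.isSome_iff_exists.mp (hsomeC c hc)
                  rw [hpc, pvVS_mono g d hpc]
                have hs := pvFold2_sum (fun c => dfsVS g d D' c) cs hsomeC 0 0
                rw [hfold] at hs
                have hq1 : q.1 = (cs.map (fun c => ((dfsVS g d D' c).getD (0, 0)).1)).sum := by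
                  simp [Option.some_inj.mp hs]
                have hq2 : q.2 = (cs.map (fun c => ((dfsVS g d D' c).getD (0, 0)).2)).sum := by
                  simp [Option.some_inj.mp hs]
                have hsomeStack : ∀ x ∈ cs.reverse ++ rest,
                    (dfsVS g d (D' + 1) x).isSome = true := by
                  intro x hx
                  rcases List.mem_append.mp hx with hx | hx
                  · obtain ⟨pc, hpc⟩ :=
                      Option.isSome_iff_exists.mp (hsomeC x (List.mem_reverse.mp hx))
                    simp [pvVS_mono g d hpc]
                  · exact hsome x (by simp [hx])
                have hszStack :
                    ((cs.reverse ++ rest).map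
                      (fun x => ((dfsVS g d (D' + 1) x).getD (0, 0)).2)).sum ≤ f' := by
                  rw [List.map_append, List.sum_append, List.map_reverse, List.sum_reverse]
                  rw [List.map_congr_left (fun c hc => congrArg Prod.snd (hmapEq c hc))]
                  simp only [List.map_cons, List.sum_cons, hhead2] at hfuel
                  rw [← hq2]
                  rw [hpq] at hfuel
                  omega
                rw [ih f' (by omega) (cs.reverse ++ rest) total hsomeStack hszStack]
                congr 1
                rw [List.map_append, List.sum_append, List.map_reverse, List.sum_reverse]
                rw [List.map_congr_left (fun c hc => congrArg Prod.fst (hmapEq c hc))]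
                simp only [List.map_cons, List.sum_cons, hhead1]
                rw [hpq]
                simp [hq1]

-- ===== A-side bridge-- ===== A-side bridge: pure (memo-free) value recursion agreeing with A's memoized run =====
def pvStepB (F : String → Option Int) (acc : Option Int) (c : String) : Option Int :=
  acc.bind (fun s => (F c).map (fun v => s + v))

def dfsPure (graph : List (String × List String)) (d : PySem.Dict String (Option Int)) :
    Nat → String → Option Int
  | 0, _ => none
  | f + 1, n =>
    match d.get? n with
    | none => none
    | some (some v) => some v
    | some none =>
      match (PySem.Dict.mk graph).get? n with
      | none => none
      | some cs =>
        if cs = [] then some 1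
        else cs.foldl (pvStepB (fun c => dfsPure graph d f c)) (some 0)

theorem pvStepB_none (F : String → Option Int) (cs : List String) :
    cs.foldl (pvStepB F) none = none := by
  induction cs with
  | nil => rfl
  | cons c cs ih => simpa [pvStepB] using ih

-- dfsVS refines dfsPure: same value, plus a size
theorem pvVS_of_pure (g : List (String × List String)) (d : PySem.Dict String (Option Int)) :
    ∀ (f : Nat) (n : String) (v : Int), dfsPure g d f n = some v →
      ∃ s, dfsVS g d f n = some (v, s) := by
  intro f
  induction f with
  | zero => intro n v h; simp [dfsPure] at h
  | succ f ih =>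
    intro n v h
    rw [dfsVS_eq]
    cases hd : d.get? n with
    | none => simp [dfsPure, hd] at h
    | some o =>
      cases o with
      | some w =>
        simp only [dfsPure, hd, Option.some_inj] at h
        cases h
        exact ⟨1, rfl⟩
      | none =>
        simp only [dfsPure, hd] at h
        cases hg : (PySem.Dict.mk g).get? n with
        | none => simp [hg] at h
        | some cs =>
          simp only [hg] at h ⊢
          by_cases hcs : cs = []
          · rw [if_pos hcs] at h
            rw [if_pos hcs]
            obtain rfl : (1 : Int) = v := by simpa using h
            exact ⟨1, rfl⟩
          · rw [if_neg hcs] at h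
            rw [if_neg hcs]
            -- relate the two folds
            have key : ∀ (cs' : List String) (a : Int) (b : Nat) (r : Int),
                cs'.foldl (pvStepB (fun c => dfsPure g d f c)) (some a) = some r →
                ∃ σ, cs'.foldl (pvStep2 (fun c => dfsVS g d f c)) (some (a, b)) = some (r, σ) := by
              intro cs'
              induction cs' with
              | nil =>
                intro a b r hr
                simp at hr
                exact ⟨b, by simp [hr]⟩
              | cons c cs'' ihc =>
                intro a b r hr
                rw [List.foldl_cons] at hr
                cases hc : dfsPure g d f c with
                | none =>
                  rw [show pvStepB (fun c => dfsPure g d f c) (some a) c = none by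
                    simp [pvStepB, hc]] at hr
                  rw [pvStepB_none] at hr
                  exact absurd hr (by simp)
                | some vc =>
                  rw [show pvStepB (fun c => dfsPure g d f c) (some a) c = some (a + vc) by
                    simp [pvStepB, hc]] at hr
                  obtain ⟨sc, hsc⟩ := ih c vc hc
                  obtain ⟨σ, hσ⟩ := ihc (a + vc) (b + sc) r hr
                  refine ⟨σ, ?_⟩
                  rw [List.foldl_cons,
                    show pvStep2 (fun c => dfsVS g d f c) (some (a, b)) c = some (a + vc, b + sc) by
                      simp [pvStep2, hsc]]
                  exact hσ
            obtain ⟨σ, hσ⟩ := key cs 0 0 v h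
            exact ⟨σ + 1, by rw [hσ]; rfl⟩

theorem pvPure_adequate (employee : String) (graph : List (String × List String))
    (salaries : List (String × Option Int)) (hPre : Pre_dfs employee graph salaries) :
    ∀ (f : Nat) (p : List String) (n : String),
      (∀ x ∈ p, (PySem.Dict.mk salaries).get? x = some none) →
      (p ++ [n]).Nodup →
      (∀ x ∈ p ++ [n], pvReach graph salaries p.length employee x = true) →
      (∀ x ∈ p ++ [n], pvReach graph salaries p.length x n = true) →
      salaries.length + 1 ≤ f + p.length →
      ∃ v, ∀ fB, salaries.length + 1 ≤ fB + p.length →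
        dfsPure graph (PySem.Dict.mk salaries) fB n = some v := by
  intro f
  induction f with
  | zero =>
    intro p n hexp hnd hFwd _hBack hfuel
    have hlen := (pvPreAt employee graph salaries hPre p n hexp hnd hFwd).1
    omega
  | succ f ih =>
    intro p n hexp hnd hFwd hBack hfuel
    obtain ⟨hlen, hsome, himp⟩ := pvPreAt employee graph salaries hPre p n hexp hnd hFwd
    cases hS : (PySem.Dict.mk salaries).get? n with
    | none => rw [hS] at hsome; simp at hsome
    | some o =>
      cases o with
      | some v =>
        refine ⟨v, fun fB hfB => ?_⟩
        obtain ⟨fB', rfl⟩ : ∃ fB', fB = fB' + 1 := ⟨fB - 1, by omega⟩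
        simp [dfsPure, hS]
      | none =>
        obtain ⟨hgsome, -⟩ := himp hS
        cases hG : (PySem.Dict.mk graph).get? n with
        | none => rw [hG] at hgsome; simp at hgsome
        | some cs =>
          by_cases hcs0 : cs = []
          · refine ⟨1, fun fB hfB => ?_⟩
            obtain ⟨fB', rfl⟩ : ∃ fB', fB = fB' + 1 := ⟨fB - 1, by omega⟩
            simp [dfsPure, hS, hG, hcs0]
          · have hkey : ∀ c ∈ cs, ∃ w, ∀ fB, salaries.length + 1 ≤ fB + (p.length + 1) →
                dfsPure graph (PySem.Dict.mk salaries) fB c = some w := by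
              intro c hc
              obtain ⟨e1, e2, e3, e4⟩ :=
                pvStepSet employee graph salaries hPre p n c cs hS hG hc hexp hnd hFwd hBack
              have hres := ih (p ++ [n]) c e1 e2 e3 e4
                (by simp only [List.length_append, List.length_singleton]; omega)
              simpa using hres
            have hfold : ∀ cs' : List String, (∀ c ∈ cs', c ∈ cs) →
                ∃ t : Int, ∀ fB, salaries.length + 1 ≤ fB + (p.length + 1) → ∀ s₀ : Int,
                  cs'.foldl (pvStepB (fun c => dfsPure graph (PySem.Dict.mk salaries) fB c))
                    (some s₀) = some (s₀ + t) := by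
              intro cs' hsub
              induction cs' with
              | nil => exact ⟨0, fun fB _ s₀ => by simp⟩
              | cons c cs'' ihc =>
                obtain ⟨w, hw⟩ := hkey c (hsub c (by simp))
                obtain ⟨t'', ht''⟩ := ihc (fun x hx => hsub x (by simp [hx]))
                refine ⟨w + t'', fun fB hfB s₀ => ?_⟩
                have h1 : pvStepB (fun c => dfsPure graph (PySem.Dict.mk salaries) fB c)
                    (some s₀) c = some (s₀ + w) := by
                  simp [pvStepB, hw fB hfB]
                rw [List.foldl_cons, h1, ht'' fB hfB (s₀ + w), add_assoc]
            obtain ⟨t, ht⟩ := hfold cs (fun c h => h)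
            refine ⟨t, fun fB hfB => ?_⟩
            obtain ⟨fB', rfl⟩ : ∃ fB', fB = fB' + 1 := ⟨fB - 1, by omega⟩
            have hfold' := ht fB' (by omega) 0
            simp only [dfsPure, hS, hG, if_neg hcs0]
            rw [hfold', zero_add]

-- the memo invariant: every entry of the running dict is either the original one or the
-- pure value of a node whose original entry was None
def pvInv (graph : List (String × List String)) (salaries : List (String × Option Int))
    (d : PySem.Dict String (Option Int)) : Prop :=
  ∀ k, d.get? k = (PySem.Dict.mk salaries).get? k ∨
    ((PySem.Dict.mk salaries).get? k = some none ∧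
     ∃ v, d.get? k = some (some v) ∧
       dfsPure graph (PySem.Dict.mk salaries) (salaries.length + 1) k = some v)

theorem pvMain (employee : String) (graph : List (String × List String))
    (salaries : List (String × Option Int)) (hPre : Pre_dfs employee graph salaries) :
    ∀ (f : Nat) (p : List String) (n : String) (d : PySem.Dict String (Option Int)),
      pvInv graph salaries d →
      (∀ x ∈ p, (PySem.Dict.mk salaries).get? x = some none) →
      (p ++ [n]).Nodup →
      (∀ x ∈ p ++ [n], pvReach graph salaries p.length employee x = true) →
      (∀ x ∈ p ++ [n], pvReach graph salaries p.length x n = true) →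
      salaries.length + 1 ≤ f + p.length →
      ∃ v d', dfsAux graph f n d = some (v, d') ∧ pvInv graph salaries d' ∧
        dfsPure graph (PySem.Dict.mk salaries) (salaries.length + 1) n = some v := by
  intro f
  induction f with
  | zero =>
    intro p n d _hInv hexp hnd hFwd _hBack hfuel
    have hlen := (pvPreAt employee graph salaries hPre p n hexp hnd hFwd).1
    omega
  | succ f ih =>
    intro p n d hInvd hexp hnd hFwd hBack hfuel
    obtain ⟨hlen, hsome, himp⟩ := pvPreAt employee graph salaries hPre p n hexp hnd hFwd
    rcases hInvd n with hEq | ⟨hSn, v, hdv, hpure⟩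
    case inr => exact ⟨v, d, by simp [dfsAux, hdv], hInvd, hpure⟩
    case inl =>
      cases hS : (PySem.Dict.mk salaries).get? n with
      | none => rw [hS] at hsome; simp at hsome
      | some o =>
        cases o with
        | some v =>
          have hdn : d.get? n = some (some v) := by rw [hEq, hS]
          exact ⟨v, d, by simp [dfsAux, hdn], hInvd, by simp [dfsPure, hS]⟩
        | none =>
          have hdn : d.get? n = some none := by rw [hEq, hS]
          obtain ⟨hgsome, -⟩ := himp hS
          cases hG : (PySem.Dict.mk graph).get? n with
          | none => rw [hG] at hgsome; simp at hgsome
          | some cs =>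
            by_cases hcs0 : cs = []
            · refine ⟨1, d.insert n (some 1), by simp [dfsAux, hdn, hG, hcs0], ?_, ?_⟩
              · intro k
                by_cases hk : k = n
                · subst hk
                  exact Or.inr ⟨hS, 1, PySem.Dict.get?_insert_self d _ _,
                    by simp [dfsPure, hS, hG, hcs0]⟩
                · rw [PySem.Dict.get?_insert_of_ne d (some 1) hk]
                  exact hInvd k
              · simp [dfsPure, hS, hG, hcs0]
            · have hkeyA : ∀ c ∈ cs, ∀ d₀, pvInv graph salaries d₀ →
                  ∃ vc d₁, dfsAux graph f c d₀ = some (vc, d₁) ∧ pvInv graph salaries d₁ ∧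
                    dfsPure graph (PySem.Dict.mk salaries) (salaries.length + 1) c = some vc := by
                intro c hc d₀ hInv₀
                obtain ⟨e1, e2, e3, e4⟩ :=
                  pvStepSet employee graph salaries hPre p n c cs hS hG hc hexp hnd hFwd hBack
                have hres := ih (p ++ [n]) c d₀ hInv₀ e1 e2 e3 e4
                  (by simp only [List.length_append, List.length_singleton]; omega)
                simpa using hres
              have hkeyP : ∀ c ∈ cs, ∃ w, ∀ fB, salaries.length + 1 ≤ fB + (p.length + 1) →
                  dfsPure graph (PySem.Dict.mk salaries) fB c = some w := by
                intro c hc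
                obtain ⟨e1, e2, e3, e4⟩ :=
                  pvStepSet employee graph salaries hPre p n c cs hS hG hc hexp hnd hFwd hBack
                have hres := pvPure_adequate employee graph salaries hPre
                  (salaries.length + 1) (p ++ [n]) c e1 e2 e3 e4
                  (by simp only [List.length_append, List.length_singleton]; omega)
                simpa using hres
              have hfold : ∀ cs' : List String, (∀ c ∈ cs', c ∈ cs) →
                  ∀ (s₀ : Int) (d₀ : PySem.Dict String (Option Int)), pvInv graph salaries d₀ →
                  ∃ t d', cs'.foldl (pvStepA (fun c d' => dfsAux graph f c d')) (some (s₀, d₀)) =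
                      some (s₀ + t, d') ∧ pvInv graph salaries d' ∧
                    ∀ fB, salaries.length + 1 ≤ fB + (p.length + 1) → ∀ s₂ : Int,
                      cs'.foldl (pvStepB (fun c => dfsPure graph (PySem.Dict.mk salaries) fB c))
                        (some s₂) = some (s₂ + t) := by
                intro cs'
                induction cs' with
                | nil =>
                  intro _ s₀ d₀ hInv₀
                  exact ⟨0, d₀, by simp, hInv₀, fun fB _ s₂ => by simp⟩
                | cons c cs'' ihc =>
                  intro hsub s₀ d₀ hInv₀
                  obtain ⟨vc, d₁, hA1, hInv₁, hPure1⟩ := hkeyA c (hsub c (by simp)) d₀ hInv₀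
                  obtain ⟨w, hw⟩ := hkeyP c (hsub c (by simp))
                  have hwv : w = vc := by
                    have h2 := hw (salaries.length + 1) (by omega)
                    rw [hPure1] at h2
                    exact (Option.some_inj.mp h2).symm
                  subst hwv
                  obtain ⟨t'', d', hA2, hInv', hB2⟩ :=
                    ihc (fun x hx => hsub x (by simp [hx])) (s₀ + w) d₁ hInv₁
                  refine ⟨w + t'', d', ?_, hInv', ?_⟩
                  · have h1 : pvStepA (fun c d' => dfsAux graph f c d') (some (s₀, d₀)) c =
                        some (s₀ + w, d₁) := by simp [pvStepA, hA1]
                    rw [List.foldl_cons, h1, hA2]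
                    rw [add_assoc]
                  · intro fB hfB s₂
                    have h1 : pvStepB (fun c => dfsPure graph (PySem.Dict.mk salaries) fB c)
                        (some s₂) c = some (s₂ + w) := by simp [pvStepB, hw fB hfB]
                    rw [List.foldl_cons, h1, hB2 fB hfB (s₂ + w), add_assoc]
              obtain ⟨t, d', hA, hInv', hB⟩ := hfold cs (fun c h => h) 0 d hInvd
              rw [zero_add] at hA
              have hBn : dfsPure graph (PySem.Dict.mk salaries) (salaries.length + 1) n = some t := by
                have h2 := hB salaries.length (by omega) 0
                rw [zero_add] at h2
                simp only [dfsPure, hS, hG, if_neg hcs0]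
                exact h2
              refine ⟨t, d'.insert n (some t), ?_, ?_, hBn⟩
              · simp [dfsAux, hdn, hG, hcs0, hA]
              · intro k
                by_cases hk : k = n
                · subst hk
                  exact Or.inr ⟨hS, t, PySem.Dict.get?_insert_self d' _ _, hBn⟩
                · rw [PySem.Dict.get?_insert_of_ne d' (some t) hk]
                  exact hInv' k

-- ===== VERDICT (by name: the statement is the Claim_ definition above) =====
theorem dfs_spec : Claim_equal_dfs := by
  intro employee graph salaries _hDom hPre
  unfold Spec_dfs dfs dfs_alt
  obtain ⟨v, d', hA, _, hB⟩ :=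
    pvMain employee graph salaries hPre (salaries.length + 1) [] employee (PySem.Dict.mk salaries)
      (fun k => Or.inl rfl)
      (by intro x hx; simp at hx)
      (by simp)
      (by intro x hx; simp at hx; subst hx; exact pvReach_refl _ _ _ _)
      (by intro x hx; simp at hx; subst hx; exact pvReach_refl _ _ _ _)
      (by omega)
  obtain ⟨sz, hVS⟩ := pvVS_of_pure graph (PySem.Dict.mk salaries) _ _ _ hB
  have hbound : sz ≤ ((graph.map (fun q => q.2.length)).sum + 2) ^ (salaries.length + 1) := by
    have := pvVS_bound graph (PySem.Dict.mk salaries) hVS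
    simpa using this
  have hfuel : sz ≤ ((graph.map (fun q => q.2.length)).sum + 2) ^ (salaries.length + 2) := by
    calc sz ≤ ((graph.map (fun q => q.2.length)).sum + 2) ^ (salaries.length + 1) := hbound
      _ ≤ ((graph.map (fun q => q.2.length)).sum + 2) ^ (salaries.length + 2) :=
          Nat.pow_le_pow_right (by omega) (by omega)
  have hloop := pvLoop_sum graph (PySem.Dict.mk salaries) (salaries.length + 1)
    (((graph.map (fun p => p.2.length)).sum + 2) ^ (salaries.length + 2))
    [employee] 0
    (by intro x hx; simp only [List.mem_singleton] at hx; subst hx; simp [hVS])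
    (by simpa [hVS] using hfuel)
  rw [hA, hloop]
  simp [hVS]
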